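-- pv_equiv track=rewrite | github.com/aherkel09/cse | day05/implode.py | implode
-- ===== SOURCE A (Python) =====
-- def implode(string_list):
--     alpha = 'abcdefghijklmnopqrstuvwxyz'
--     imploded = []
--
--     for string in string_list:
--         chars = ''
--         for a in alpha:
--             if a in string and a not in chars:
--                 chars += a
--         imploded += [chars]
--
--     return imploded
-- ===== SOURCE B (Python) =====
-- def implode(string_list):
--     alpha = set('abcdefghijklmnopqrstuvwxyz')
--     return [''.join(sorted(set(s) & alpha)) for s in string_list]
-- ===== Notes on version B (the rewrite author's own statement) =====
-- stated objective: simpler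
-- what changed: Replaces A's ordered 26-letter scan with per-letter substring and dedup tests by building the set of the string's own characters, intersecting with the alphabet set and sorting the at-most-26 survivors.
import Mathlib
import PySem

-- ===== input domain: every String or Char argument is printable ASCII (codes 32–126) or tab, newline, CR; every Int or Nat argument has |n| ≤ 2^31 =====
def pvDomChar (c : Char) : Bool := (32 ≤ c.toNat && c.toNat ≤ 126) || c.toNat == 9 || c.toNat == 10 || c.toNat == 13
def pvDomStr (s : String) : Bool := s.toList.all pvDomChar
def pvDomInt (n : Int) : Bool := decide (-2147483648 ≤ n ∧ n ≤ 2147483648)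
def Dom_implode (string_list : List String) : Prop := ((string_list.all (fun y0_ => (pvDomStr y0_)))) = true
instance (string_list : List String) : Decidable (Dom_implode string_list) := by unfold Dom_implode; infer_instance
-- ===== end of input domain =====

-- B replaces A's ordered alphabet scan (per-letter substring membership tests) by
-- set-intersection of the string's characters with the alphabet followed by a sort; simpler.

-- ===== PORT A =====
-- the alphabet string literal of A, as a list of chars
def pvAlpha : List Char := "abcdefghijklmnopqrstuvwxyz".toList

def implode (string_list : List String) : List String :=
  string_list.foldl
    (fun imploded string =>
      imploded ++ [String.ofList
        (pvAlpha.foldl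
          (fun chars a =>
            -- 'a in string and a not in chars' — single-char substring membership
            if PySem.Chars.isIn [a] string.toList && !(PySem.Chars.isIn [a] chars) then
              chars ++ [a]
            else chars)
          [])])
    []

-- ===== PORT B =====
def pvAlphaSet : PySem.Set Char := PySem.Set.ofList "abcdefghijklmnopqrstuvwxyz".toList

def implode_alt (string_list : List String) : List String :=
  string_list.map (fun s =>
    String.ofList (PySem.List.sorted
      (PySem.Set.inter (PySem.Set.ofList s.toList) pvAlphaSet) (fun c => c) false))

-- ===== PRECONDITION & SPEC =====
def Spec_implode (string_list : List String) (out : List String) : Prop := out = implode_alt string_list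
instance (string_list : List String) (out : List String) : Decidable (Spec_implode string_list out) := by unfold Spec_implode; infer_instance

-- ===== CLAIM (what is proved, stated in full; the proofs are below) =====
def Claim_equal_implode : Prop := ∀ (string_list : List String), Dom_implode string_list → Spec_implode string_list (implode string_list)

-- ===== LEMMAS AND PROOFS =====

-- 'c in s' for a single character c is exactly list membership
lemma isIn_single (a : Char) (l : List Char) : PySem.Chars.isIn [a] l = l.contains a := by
  by_cases h : a ∈ l
  · obtain ⟨u, v, rfl⟩ := List.append_of_mem h
    have hinf : [a] <:+: u ++ a :: v := ⟨u, v, by simp⟩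
    simp [(PySem.Chars.isIn_iff_infix _ _).mpr hinf, h]
  · have hf : PySem.Chars.isIn [a] l = false := by
      apply (PySem.Chars.isIn_eq_false_iff _ _).mpr
      intro hinf
      exact h (List.singleton_sublist.mp hinf.sublist)
    simp [hf, h]

-- A's inner loop over a duplicate-free letter list is a filter
lemma foldl_dedup_filter (p : Char → Bool) :
    ∀ (l acc : List Char), l.Nodup → (∀ a ∈ l, a ∉ acc) →
      l.foldl (fun chars a => if p a && !chars.contains a then chars ++ [a] else chars) acc
        = acc ++ l.filter p := by
  intro l
  induction l with
  | nil => intro acc _ _; simp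
  | cons a l ih =>
    intro acc hnd hdisj
    have ha : acc.contains a = false := by
      simp only [List.contains_eq_mem, decide_eq_false_iff_not]
      exact hdisj a (by simp)
    simp only [List.foldl_cons]
    have hbranch : (if (p a && !acc.contains a) = true then acc ++ [a] else acc)
        = if p a = true then acc ++ [a] else acc := by
      have hna : a ∉ acc := by simpa using ha
      simp [hna]
    rw [hbranch]
    by_cases hp : p a = true
    · have hdisj' : ∀ b ∈ l, b ∉ acc ++ [a] := by
        intro b hb
        simp only [List.mem_append, List.mem_singleton]
        rintro (h | rfl)
        · exact hdisj b (by simp [hb]) h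
        · exact (List.nodup_cons.mp hnd).1 hb
      rw [if_pos hp, ih (acc ++ [a]) (List.nodup_cons.mp hnd).2 hdisj']
      simp [hp]
    · rw [if_neg hp, ih acc (List.nodup_cons.mp hnd).2 (fun b hb => hdisj b (by simp [hb]))]
      simp [hp]

lemma alpha_nodup : pvAlpha.Nodup := by decide

lemma alpha_pairwise_lt : pvAlpha.Pairwise (· < ·) := by decide

-- per-string agreement of the two loops
lemma per_string (s : String) :
    pvAlpha.foldl
      (fun chars a =>
        if PySem.Chars.isIn [a] s.toList && !(PySem.Chars.isIn [a] chars) then chars ++ [a]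
        else chars) []
    = PySem.List.sorted
        (PySem.Set.inter (PySem.Set.ofList s.toList) pvAlphaSet) (fun c => c) false := by
  have hA :
      pvAlpha.foldl
        (fun chars a =>
          if PySem.Chars.isIn [a] s.toList && !(PySem.Chars.isIn [a] chars) then chars ++ [a]
          else chars) []
      = pvAlpha.filter (fun a => s.toList.contains a) := by
    have := foldl_dedup_filter (fun a => s.toList.contains a) pvAlpha [] alpha_nodup
      (by simp)
    simp only [isIn_single] at *
    simpa using this
  rw [hA]
  symm
  apply PySem.List.sorted_eq_of_perm_of_pairwise_lt
  · apply (List.perm_ext_iff_of_nodup (alpha_nodup.filter _)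
      (PySem.Set.nodup_inter _ _ (PySem.Set.nodup_ofList _))).mpr
    intro y
    simp only [List.mem_filter, PySem.Set.mem_inter, PySem.Set.mem_ofList,
      List.contains_eq_mem, decide_eq_true_eq]
    constructor
    · rintro ⟨hy, hs⟩
      exact ⟨hs, by simpa [pvAlphaSet, PySem.Set.mem_ofList, pvAlpha] using hy⟩
    · rintro ⟨hs, hy⟩
      exact ⟨by simpa [pvAlphaSet, PySem.Set.mem_ofList, pvAlpha] using hy, hs⟩
  · exact alpha_pairwise_lt.filter _

-- ===== VERDICT (by name: the statement is the Claim_ definition above) =====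
theorem implode_spec : Claim_equal_implode := by
  intro string_list _
  unfold Spec_implode implode implode_alt
  rw [PySem.List.foldl_append_singleton_eq_map]
  simp only [List.nil_append]
  apply List.map_congr_left
  intro s _
  rw [per_string]
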